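-- pv_equiv track=rewrite | github.com/YichenNie/ichw | tile_ver_1.2.py | basetile
-- ===== SOURCE A (Python) =====
-- def basetile(x, y, z, t):
--
--     m = []
--     n = []
--     o = []
--
--     for i in range(z):
--         for j in range(t):
--             m.append(i*x + j)
--             n.append(j*x + i)
--
--     m.sort()
--     n.sort()
--
--     if m[-1] < x*y:
--         o.append(m)
--     if n[-1] < x*y:
--         o.append(n)
--
--     return o
-- ===== SOURCE B (Python) =====
-- def basetile(x, y, z, t):
--     # Merge the already-sorted arithmetic runs instead of sorting: m is the
--     # merge of the z increasing runs [i*x, i*x+1, ..., i*x+t-1], n of t runs.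
--     def merge(a, b):
--         out = []
--         i = j = 0
--         la, lb = len(a), len(b)
--         while i < la and j < lb:
--             if a[i] <= b[j]:
--                 out.append(a[i]); i += 1
--             else:
--                 out.append(b[j]); j += 1
--         out.extend(a[i:])
--         out.extend(b[j:])
--         return out
--
--     def merge_all(runs):
--         # pairwise rounds: merge neighbours until one list is left
--         if not runs:
--             return []
--         while len(runs) > 1:
--             runs = [merge(runs[k], runs[k + 1]) if k + 1 < len(runs) else runs[k]
--                     for k in range(0, len(runs), 2)]
--         return runs[0]
--
--     m = merge_all([[i * x + j for j in range(t)] for i in range(z)])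
--     n = merge_all([[j * x + i for i in range(z)] for j in range(t)])
--
--     o = []
--     if m[-1] < x * y:
--         o.append(m)
--     if n[-1] < x * y:
--         o.append(n)
--     return o
-- ===== Notes on version B (the rewrite author's own statement) =====
-- stated objective: alternative
-- what changed: B never calls sort: it builds each arithmetic run already in increasing order and merges the runs in pairwise rounds with a hand-written two-pointer merge, where A appends everything into one flat list and sorts it.
import Mathlib
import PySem

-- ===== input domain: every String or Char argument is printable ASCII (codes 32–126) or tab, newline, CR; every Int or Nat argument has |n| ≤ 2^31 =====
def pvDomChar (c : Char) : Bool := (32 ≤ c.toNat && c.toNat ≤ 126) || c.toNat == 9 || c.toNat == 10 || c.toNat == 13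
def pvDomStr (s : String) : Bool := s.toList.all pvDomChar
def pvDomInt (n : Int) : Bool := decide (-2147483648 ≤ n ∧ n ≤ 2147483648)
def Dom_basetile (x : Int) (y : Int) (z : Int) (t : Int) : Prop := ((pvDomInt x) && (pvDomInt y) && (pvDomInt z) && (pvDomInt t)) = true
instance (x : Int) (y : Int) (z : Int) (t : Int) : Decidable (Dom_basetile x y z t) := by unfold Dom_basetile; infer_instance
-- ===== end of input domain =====

-- B replaces A's sort of the flat list by pairwise two-pointer merging of the
-- already-sorted arithmetic runs (objective: alternative algorithm, no speed claim).

-- ===== PORT A =====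
-- m and n are built together in one nested loop over pairs; the two `.append`s
-- are rendered as cons onto reversed accumulators, reversed back before sorting
-- (the linear-time rendering of an append loop); `.sort()` is ported as the
-- stable library mergeSort (on Int the sorted rearrangement is unique, proved below).
-- m[-1]/n[-1] is PySem.List.pyGet? _ (-1) — Pre_basetile makes the lists nonempty,
-- so the .getD 0 default is never the value used.
def basetile (x : Int) (y : Int) (z : Int) (t : Int) : List (List Int) :=
  let mn := (PySem.List.pyRange 0 z 1).foldl
      (fun s i => (PySem.List.pyRange 0 t 1).foldl
         (fun s2 j => ((i * x + j) :: s2.1, (j * x + i) :: s2.2)) s) ([], [])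
  let m := mn.1.reverse.mergeSort (fun a b => a ≤ b)
  let n := mn.2.reverse.mergeSort (fun a b => a ≤ b)
  (if (PySem.List.pyGet? m (-1)).getD 0 < x * y then [m] else []) ++
  (if (PySem.List.pyGet? n (-1)).getD 0 < x * y then [n] else [])

-- ===== PORT B =====
-- Source B's hand-written two-pointer merge, step for step: `out` is the (reversed)
-- accumulator of the while loop; the base cases are the two trailing `extend`s
def mergeLoop : List Int → List Int → List Int → List Int
  | out, [], b => out.reverse ++ b
  | out, a, [] => out.reverse ++ a
  | out, a :: as, b :: bs =>
      if a ≤ b then mergeLoop (a :: out) as (b :: bs) else mergeLoop (b :: out) (a :: as) bs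
  termination_by _ a b => a.length + b.length

def mergeInt (a b : List Int) : List Int := mergeLoop [] a b

-- one round of Source B's merge_all: merge neighbours (the odd last run is kept);
-- `out` accumulates the comprehension's list in reverse
def mergePairsLoop : List (List Int) → List (List Int) → List (List Int)
  | out, a :: b :: rest => mergePairsLoop (mergeInt a b :: out) rest
  | out, rs => out.reverse ++ rs

def mergePairs (rs : List (List Int)) : List (List Int) := mergePairsLoop [] rs

theorem mergePairsLoop_length_le : ∀ (rs out : List (List Int)),
    (mergePairsLoop out rs).length ≤ out.length + rs.length
  | [], out => by simp [mergePairsLoop]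
  | [a], out => by simp [mergePairsLoop]
  | a :: b :: rest, out => by
      rw [mergePairsLoop]
      have := mergePairsLoop_length_le rest (mergeInt a b :: out)
      simp only [List.length_cons] at this ⊢
      omega

theorem mergePairs_length_lt (a b : List Int) (rest : List (List Int)) :
    (mergePairs (a :: b :: rest)).length < rest.length + 2 := by
  have h := mergePairsLoop_length_le rest [mergeInt a b]
  rw [mergePairs, mergePairsLoop]
  simp only [List.length_cons, List.length_nil] at h ⊢
  omega

-- Source B's merge_all: pairwise rounds until one list is left
def mergeAll : List (List Int) → List Int
  | [] => []
  | [r] => r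
  | a :: b :: rest => mergeAll (mergePairs (a :: b :: rest))
  termination_by rs => rs.length
  decreasing_by
    simp only [List.length_cons]
    exact mergePairs_length_lt a b rest

def basetile_alt (x : Int) (y : Int) (z : Int) (t : Int) : List (List Int) :=
  let m := mergeAll ((PySem.List.pyRange 0 z 1).map
      (fun i => (PySem.List.pyRange 0 t 1).map (fun j => i * x + j)))
  let n := mergeAll ((PySem.List.pyRange 0 t 1).map
      (fun j => (PySem.List.pyRange 0 z 1).map (fun i => j * x + i)))
  (if (PySem.List.pyGet? m (-1)).getD 0 < x * y then [m] else []) ++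
  (if (PySem.List.pyGet? n (-1)).getD 0 < x * y then [n] else [])

-- ===== PRECONDITION & SPEC =====
-- A evaluates m[-1] (and n[-1]); when z ≤ 0 or t ≤ 0 both lists are empty and
-- Python raises IndexError, so exactly those inputs are excluded.
def Pre_basetile (x : Int) (y : Int) (z : Int) (t : Int) : Prop := 1 ≤ z ∧ 1 ≤ t
instance (x : Int) (y : Int) (z : Int) (t : Int) : Decidable (Pre_basetile x y z t) := by unfold Pre_basetile; infer_instance
def pvWitness_basetile : Int × Int × Int × Int := (2, 5, 3, 2)

def Spec_basetile (x : Int) (y : Int) (z : Int) (t : Int) (out : List (List Int)) : Prop := out = basetile_alt x y z t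
instance (x : Int) (y : Int) (z : Int) (t : Int) (out : List (List Int)) : Decidable (Spec_basetile x y z t out) := by unfold Spec_basetile; infer_instance

-- ===== CLAIM (what is proved, stated in full; the proofs are below) =====
def Claim_equal_basetile : Prop := ∀ (x : Int) (y : Int) (z : Int) (t : Int), Dom_basetile x y z t → Pre_basetile x y z t → Spec_basetile x y z t (basetile x y z t)

-- ===== LEMMAS AND PROOFS =====

-- proof-side recursion equal to mergeLoop with an empty accumulator
def mergeSpec : List Int → List Int → List Int
  | [], b => b
  | a, [] => a
  | a :: as, b :: bs =>
      if a ≤ b then a :: mergeSpec as (b :: bs) else b :: mergeSpec (a :: as) bs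
  termination_by a b => a.length + b.length

theorem mergeLoop_eq : ∀ (a b out : List Int), mergeLoop out a b = out.reverse ++ mergeSpec a b
  | [], b, out => by simp [mergeLoop, mergeSpec]
  | a :: as, [], out => by simp [mergeLoop, mergeSpec]
  | a :: as, b :: bs, out => by
      rw [mergeLoop, mergeSpec]
      split
      · rw [mergeLoop_eq as (b :: bs) (a :: out)]; simp
      · rw [mergeLoop_eq (a :: as) bs (b :: out)]; simp
  termination_by a b _ => a.length + b.length

theorem mergeInt_eq_mergeSpec (a b : List Int) : mergeInt a b = mergeSpec a b := by
  rw [mergeInt, mergeLoop_eq]; simp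

theorem mergeSpec_perm : ∀ (a b : List Int), (mergeSpec a b).Perm (a ++ b)
  | [], b => by simp [mergeSpec]
  | a :: as, [] => by simp [mergeSpec]
  | a :: as, b :: bs => by
      rw [mergeSpec]
      split
      · exact (mergeSpec_perm as (b :: bs)).cons a
      · exact ((mergeSpec_perm (a :: as) bs).cons b).trans List.perm_middle.symm
  termination_by a b => a.length + b.length

theorem mergeInt_perm (a b : List Int) : (mergeInt a b).Perm (a ++ b) := by
  rw [mergeInt_eq_mergeSpec]; exact mergeSpec_perm a b

theorem mergeSpec_pairwise : ∀ (a b : List Int),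
    a.Pairwise (· ≤ ·) → b.Pairwise (· ≤ ·) → (mergeSpec a b).Pairwise (· ≤ ·)
  | [], b, _, hb => by simpa [mergeSpec] using hb
  | a :: as, [], ha, _ => by simpa [mergeSpec] using ha
  | a :: as, b :: bs, ha, hb => by
      rw [mergeSpec]
      obtain ⟨ha1, ha2⟩ := List.pairwise_cons.mp ha
      obtain ⟨hb1, hb2⟩ := List.pairwise_cons.mp hb
      split
      · rename_i hab
        refine List.pairwise_cons.mpr ⟨fun x hx => ?_, mergeSpec_pairwise as (b :: bs) ha2 hb⟩
        have hx' := (mergeSpec_perm as (b :: bs)).mem_iff.mp hx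
        rcases List.mem_append.mp hx' with h | h
        · exact ha1 x h
        · rcases List.mem_cons.mp h with h | h
          · exact h ▸ hab
          · exact le_trans hab (hb1 x h)
      · rename_i hab
        refine List.pairwise_cons.mpr ⟨fun x hx => ?_, mergeSpec_pairwise (a :: as) bs ha hb2⟩
        have hba : b ≤ a := le_of_not_ge hab
        have hx' := (mergeSpec_perm (a :: as) bs).mem_iff.mp hx
        rcases List.mem_append.mp hx' with h | h
        · rcases List.mem_cons.mp h with h | h
          · exact h ▸ hba
          · exact le_trans hba (ha1 x h)
        · exact hb1 x h
  termination_by a b => a.length + b.length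

theorem mergeInt_pairwise (a b : List Int) (ha : a.Pairwise (· ≤ ·)) (hb : b.Pairwise (· ≤ ·)) :
    (mergeInt a b).Pairwise (· ≤ ·) := by
  rw [mergeInt_eq_mergeSpec]; exact mergeSpec_pairwise a b ha hb

-- proof-side recursion equal to mergePairsLoop with an empty accumulator
def mergePairsSpec : List (List Int) → List (List Int)
  | a :: b :: rest => mergeInt a b :: mergePairsSpec rest
  | rs => rs

theorem mergePairsLoop_eq : ∀ (rs out : List (List Int)),
    mergePairsLoop out rs = out.reverse ++ mergePairsSpec rs
  | [], out => by simp [mergePairsLoop, mergePairsSpec]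
  | [a], out => by simp [mergePairsLoop, mergePairsSpec]
  | a :: b :: rest, out => by
      rw [mergePairsLoop, mergePairsSpec, mergePairsLoop_eq rest (mergeInt a b :: out)]
      simp

theorem mergePairs_eq_spec (rs : List (List Int)) : mergePairs rs = mergePairsSpec rs := by
  rw [mergePairs, mergePairsLoop_eq]; simp

theorem mergePairsSpec_flatten_perm : ∀ rs : List (List Int), (mergePairsSpec rs).flatten.Perm rs.flatten
  | [] => by simp [mergePairsSpec]
  | [a] => by simp [mergePairsSpec]
  | a :: b :: rest => by
      simp only [mergePairsSpec, List.flatten_cons]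
      have h := (mergeInt_perm a b).append (mergePairsSpec_flatten_perm rest)
      rw [List.append_assoc] at h
      exact h

theorem mergePairs_flatten_perm (rs : List (List Int)) : (mergePairs rs).flatten.Perm rs.flatten := by
  rw [mergePairs_eq_spec]; exact mergePairsSpec_flatten_perm rs

theorem mergePairsSpec_pairwise : ∀ rs : List (List Int),
    (∀ r ∈ rs, r.Pairwise (· ≤ ·)) → ∀ r ∈ mergePairsSpec rs, r.Pairwise (· ≤ ·)
  | [] => by simp [mergePairsSpec]
  | [a] => by simp [mergePairsSpec]
  | a :: b :: rest => by
      intro h r hr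
      simp only [mergePairsSpec, List.mem_cons] at hr
      rcases hr with hr | hr
      · exact hr ▸ mergeInt_pairwise a b (h a (by simp)) (h b (by simp))
      · exact mergePairsSpec_pairwise rest (fun r hr => h r (by simp [hr])) r hr

theorem mergePairs_pairwise (rs : List (List Int))
    (h : ∀ r ∈ rs, r.Pairwise (· ≤ ·)) : ∀ r ∈ mergePairs rs, r.Pairwise (· ≤ ·) := by
  rw [mergePairs_eq_spec]; exact mergePairsSpec_pairwise rs h

theorem mergeAll_spec : ∀ rs : List (List Int), (∀ r ∈ rs, r.Pairwise (· ≤ ·)) →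
    (mergeAll rs).Perm rs.flatten ∧ (mergeAll rs).Pairwise (· ≤ ·)
  | [], _ => by simp [mergeAll]
  | [r], h => by simpa [mergeAll] using h r (by simp)
  | a :: b :: rest, h => by
      rw [mergeAll]
      obtain ⟨p, q⟩ := mergeAll_spec (mergePairs (a :: b :: rest))
        (mergePairs_pairwise (a :: b :: rest) h)
      exact ⟨p.trans (mergePairs_flatten_perm (a :: b :: rest)), q⟩
  termination_by rs => rs.length
  decreasing_by
    simp only [List.length_cons]
    exact mergePairs_length_lt a b rest

theorem flatMap_map_comm (f : Int → Int → Int) (l1 l2 : List Int) :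
    (l1.flatMap fun a => l2.map fun b => f a b).Perm (l2.flatMap fun b => l1.map fun a => f a b) := by
  rw [← Multiset.coe_eq_coe, ← Multiset.coe_bind, ← Multiset.coe_bind]
  simp only [← Multiset.map_coe]
  exact Multiset.bind_map_comm _ _

theorem run_pairwise (c : Int) (a b : Int) :
    ((PySem.List.pyRange a b 1).map (fun j => c + j)).Pairwise (· ≤ ·) := by
  refine List.Pairwise.map _ (fun p q h => ?_) (PySem.List.pairwise_lt_pyRange_one a b)
  omega

-- the pair-state nested loop of A, split into the two (reversed) flat lists it builds
theorem foldl_cons_rev {α β : Type} (h : α → β) (l : List α) (acc : List β) :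
    l.foldl (fun acc x => h x :: acc) acc = (l.map h).reverse ++ acc := by
  induction l generalizing acc with
  | nil => simp
  | cons a l ih => simp [ih]

theorem foldl_revapp {α β : Type} (q : α → List β) (l : List α) (acc : List β) :
    l.foldl (fun accl i => (q i).reverse ++ accl) acc = (l.flatMap q).reverse ++ acc := by
  induction l generalizing acc with
  | nil => simp
  | cons a l ih => simp [ih]

theorem basetile_mn (x z t : Int) :
    (PySem.List.pyRange 0 z 1).foldl
      (fun s i => (PySem.List.pyRange 0 t 1).foldl
         (fun s2 j => ((i * x + j) :: s2.1, (j * x + i) :: s2.2)) s) ([], []) =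
    (((PySem.List.pyRange 0 z 1).flatMap (fun i => (PySem.List.pyRange 0 t 1).map fun j => i * x + j)).reverse,
     ((PySem.List.pyRange 0 z 1).flatMap (fun i => (PySem.List.pyRange 0 t 1).map fun j => j * x + i)).reverse) := by
  have hinner : ∀ (s : List Int × List Int) (i : Int),
      (PySem.List.pyRange 0 t 1).foldl
         (fun s2 j => ((i * x + j) :: s2.1, (j * x + i) :: s2.2)) s =
      (((PySem.List.pyRange 0 t 1).map (fun j => i * x + j)).reverse ++ s.1,
       ((PySem.List.pyRange 0 t 1).map (fun j => j * x + i)).reverse ++ s.2) := by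
    rintro ⟨u, v⟩ i
    rw [PySem.List.foldl_prod_mk (f := fun l j => (i * x + j) :: l) (g := fun l j => (j * x + i) :: l),
        foldl_cons_rev, foldl_cons_rev]
  rw [PySem.List.foldl_congr_mem (g := fun s i =>
        (((PySem.List.pyRange 0 t 1).map (fun j => i * x + j)).reverse ++ s.1,
         ((PySem.List.pyRange 0 t 1).map (fun j => j * x + i)).reverse ++ s.2))
      (h := fun s i _ => hinner s i),
      PySem.List.foldl_prod_mk
        (f := fun l i => ((PySem.List.pyRange 0 t 1).map (fun j => i * x + j)).reverse ++ l)
        (g := fun l i => ((PySem.List.pyRange 0 t 1).map (fun j => j * x + i)).reverse ++ l),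
      foldl_revapp, foldl_revapp]
  simp

-- mergeSort with (· ≤ ·) on Int returns THE sorted rearrangement: any ≤-pairwise
-- permutation of the input equals it
theorem mergeSort_eq_of_perm_of_pairwise (xs ys : List Int) (hperm : ys.Perm xs)
    (hpw : ys.Pairwise (· ≤ ·)) : xs.mergeSort (fun a b => a ≤ b) = ys := by
  have hms : (xs.mergeSort (fun a b => a ≤ b)).Pairwise (fun a b : Int => a ≤ b) := by
    have h := List.pairwise_mergeSort (le := fun a b : Int => a ≤ b)
      (by intro a b c h1 h2; simp only [decide_eq_true_eq] at *; omega)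
      (by intro a b; simp only [Bool.or_eq_true, decide_eq_true_eq]; omega) xs
    exact h.imp (fun hd => by simpa using hd)
  exact List.Perm.eq_of_pairwise (fun a b _ _ h1 h2 => le_antisymm h1 h2) hms hpw
    ((List.mergeSort_perm xs _).trans hperm.symm)

-- ===== VERDICT (by name: the statement is the Claim_ definition above) =====
theorem basetile_spec : Claim_equal_basetile := by
  intro x y z t _ _
  unfold Spec_basetile basetile basetile_alt
  dsimp only
  rw [basetile_mn]
  dsimp only
  have hm := mergeAll_spec ((PySem.List.pyRange 0 z 1).map
      (fun i => (PySem.List.pyRange 0 t 1).map (fun j => i * x + j)))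
      (by intro r hr
          obtain ⟨i, _, rfl⟩ := List.mem_map.mp hr
          exact run_pairwise (i * x) 0 t)
  have hn := mergeAll_spec ((PySem.List.pyRange 0 t 1).map
      (fun j => (PySem.List.pyRange 0 z 1).map (fun i => j * x + i)))
      (by intro r hr
          obtain ⟨j, _, rfl⟩ := List.mem_map.mp hr
          exact run_pairwise (j * x) 0 z)
  simp only [← List.flatMap_def] at hm hn
  have hmeq : (((PySem.List.pyRange 0 z 1).flatMap fun i =>
        (PySem.List.pyRange 0 t 1).map fun j => i * x + j).mergeSort (fun a b => a ≤ b)) =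
      mergeAll ((PySem.List.pyRange 0 z 1).map
        (fun i => (PySem.List.pyRange 0 t 1).map (fun j => i * x + j))) :=
    mergeSort_eq_of_perm_of_pairwise _ _ hm.1 hm.2
  have hnperm : (mergeAll ((PySem.List.pyRange 0 t 1).map
        (fun j => (PySem.List.pyRange 0 z 1).map (fun i => j * x + i)))).Perm
      ((PySem.List.pyRange 0 z 1).flatMap fun i => (PySem.List.pyRange 0 t 1).map fun j => j * x + i) :=
    hn.1.trans (flatMap_map_comm (fun j i => j * x + i) (PySem.List.pyRange 0 t 1) (PySem.List.pyRange 0 z 1))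
  have hneq : (((PySem.List.pyRange 0 z 1).flatMap fun i =>
        (PySem.List.pyRange 0 t 1).map fun j => j * x + i).mergeSort (fun a b => a ≤ b)) =
      mergeAll ((PySem.List.pyRange 0 t 1).map
        (fun j => (PySem.List.pyRange 0 z 1).map (fun i => j * x + i))) :=
    mergeSort_eq_of_perm_of_pairwise _ _ hnperm hn.2
  rw [List.reverse_reverse, List.reverse_reverse, hmeq, hneq]
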